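-- pv_equiv track=rewrite | github.com/1ELM7/L1SN_Tlse3_PaulSabatier | Pixal/Progresser/L1S2_Algo/TP 1 - Révisions CT L1S1 Info/CT dec 2020 (SN)/3 derniers impairs/3derniersImpairs.py | derniers_indices
-- ===== SOURCE A (Python) =====
-- def derniers_indices(liste_entree):
--     longueur = len(liste_entree)-1
--     derniers_impairs=[]
--     count=0
--     while longueur>=0:
--         if count < 3 and (liste_entree[longueur]%2==1):
--             count+=1
--             derniers_impairs.append(longueur)
--         longueur-=1
--
--     return derniers_impairs
-- ===== SOURCE B (Python) =====
-- def derniers_indices(liste_entree):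
--     idx = [i for i, x in enumerate(liste_entree) if x % 2 == 1]
--     return idx[::-1][:3]
-- ===== Notes on version B (the rewrite author's own statement) =====
-- stated objective: simpler
-- what changed: Replaces the backward while-loop with a bounded counter and append-accumulator by a single forward comprehension collecting all odd indices, then slicing the last three in end-first order via reverse+take.
import Mathlib
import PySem

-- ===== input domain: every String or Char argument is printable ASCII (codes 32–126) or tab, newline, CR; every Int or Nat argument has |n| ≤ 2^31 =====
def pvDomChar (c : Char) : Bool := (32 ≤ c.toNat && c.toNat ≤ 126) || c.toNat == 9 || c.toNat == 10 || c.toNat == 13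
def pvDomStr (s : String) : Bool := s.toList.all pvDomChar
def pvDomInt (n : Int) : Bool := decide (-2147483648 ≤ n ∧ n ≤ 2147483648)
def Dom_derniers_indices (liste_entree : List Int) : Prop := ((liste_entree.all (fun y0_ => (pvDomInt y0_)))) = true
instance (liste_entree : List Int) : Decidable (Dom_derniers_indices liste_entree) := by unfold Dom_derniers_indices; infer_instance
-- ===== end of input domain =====

-- B replaces A's backward counting while-loop by a forward comprehension of all odd
-- indices followed by reverse-and-take-3 (objective: simpler decomposition).


-- ===== PORT A =====
-- while longueur >= 0: … ported as structural recursion on longueur+1;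
-- liste_entree[longueur] is always in range (0 ≤ longueur < len), so getD is exact.
def pvDLoop (l : List Int) : Nat → Nat → List Int → List Int
  | 0, _, acc => acc
  | k + 1, count, acc =>
      if count < 3 ∧ l.getD k 0 % 2 = 1 then
        pvDLoop l k (count + 1) (acc ++ [(k : Int)])
      else
        pvDLoop l k count acc

def derniers_indices (liste_entree : List Int) : List Int :=
  pvDLoop liste_entree liste_entree.length 0 []

-- ===== PORT B =====
-- idx = [i for i, x in enumerate(liste_entree) if x % 2 == 1]; return idx[::-1][:3]
def derniers_indices_alt (liste_entree : List Int) : List Int :=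
  let idx := ((PySem.List.enumerate liste_entree).filter (fun q => q.2 % 2 == 1)).map Prod.fst
  idx.reverse.take 3

-- ===== PRECONDITION & SPEC =====
def Spec_derniers_indices (liste_entree : List Int) (out : List Int) : Prop := out = derniers_indices_alt liste_entree
instance (liste_entree : List Int) (out : List Int) : Decidable (Spec_derniers_indices liste_entree out) := by unfold Spec_derniers_indices; infer_instance

-- ===== CLAIM (what is proved, stated in full; the proofs are below) =====
def Claim_equal_derniers_indices : Prop := ∀ (liste_entree : List Int), Dom_derniers_indices liste_entree → Spec_derniers_indices liste_entree (derniers_indices liste_entree)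

-- ===== LEMMAS AND PROOFS =====

/-- Ascending list of the odd-value indices of `l`, offset by `s`. -/
def oddIdx (l : List Int) (s : Int) : List Int :=
  match l with
  | [] => []
  | x :: xs => if x % 2 = 1 then s :: oddIdx xs (s + 1) else oddIdx xs (s + 1)

theorem oddIdx_append (a b : List Int) (s : Int) :
    oddIdx (a ++ b) s = oddIdx a s ++ oddIdx b (s + a.length) := by
  induction a generalizing s with
  | nil => simp [oddIdx]
  | cons x xs ih =>
    simp only [List.cons_append, oddIdx, ih (s + 1)]
    split <;> simp <;> ring_nf

theorem enum_filter_eq_oddIdx (l : List Int) (s : Int) :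
    ((PySem.List.enumerate l s).filter (fun q => q.2 % 2 == 1)).map Prod.fst = oddIdx l s := by
  induction l generalizing s with
  | nil => simp [PySem.List.enumerate_nil, oddIdx]
  | cons x xs ih =>
    rw [PySem.List.enumerate_cons]
    by_cases h : x % 2 = 1 <;> simp [oddIdx, h, ih]

theorem dLoop_eq (l : List Int) :
    ∀ (k : Nat), k ≤ l.length → ∀ (count : Nat) (acc : List Int), count ≤ 3 →
      pvDLoop l k count acc = acc ++ ((oddIdx (l.take k) 0).reverse.take (3 - count)) := by
  intro k
  induction k with
  | zero => intro _ count acc _; simp [pvDLoop, oddIdx]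
  | succ k ih =>
    intro hk count acc hc
    have hklt : k < l.length := by omega
    have htake : l.take (k + 1) = l.take k ++ [l[k]] := by
      rw [List.take_succ, List.getElem?_eq_getElem hklt]; rfl
    have hlen : (l.take k).length = k := by simp [List.length_take]; omega
    have hsplit : oddIdx (l.take (k + 1)) 0 =
        oddIdx (l.take k) 0 ++ (if l[k] % 2 = 1 then [(k : Int)] else []) := by
      rw [htake, oddIdx_append, hlen]
      simp [oddIdx]
    have hgd : l.getD k 0 = l[k] := List.getD_eq_getElem l 0 hklt
    rw [pvDLoop]
    by_cases h1 : count < 3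
    · by_cases h2 : l[k] % 2 = 1
      · rw [if_pos ⟨h1, by rw [hgd]; exact h2⟩, ih (by omega) (count + 1) _ (by omega),
          hsplit, if_pos h2]
        have h3 : 3 - count = (3 - (count + 1)) + 1 := by omega
        simp [h3, List.take_succ_cons]
      · rw [if_neg (by rw [hgd]; tauto), ih (by omega) count acc hc, hsplit, if_neg h2]
        simp
    · have hc3 : count = 3 := by omega
      rw [if_neg (by tauto), ih (by omega) count acc hc, hsplit]
      simp [hc3]

-- ===== VERDICT (by name: the statement is the Claim_ definition above) =====
theorem derniers_indices_spec : Claim_equal_derniers_indices := by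
  intro l _
  unfold Spec_derniers_indices derniers_indices derniers_indices_alt
  rw [dLoop_eq l l.length (le_refl _) 0 [] (by omega), enum_filter_eq_oddIdx]
  simp
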